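-- pv_equiv track=rewrite | github.com/pythoneda-shared-pythonlang/domain | pythoneda/shared/flow.py | first_continued_second
-- ===== SOURCE A (Python) =====
-- from typing import Any, List
--
-- def first_continued_second(first: List[str], second: List[str]) -> bool:
--     """
--     Check if the first list is a continuation of the second list.
--     :param first: The first list.
--     :type first: List[str]
--     :param second: The second list.
--     :type second: List[str]
--     :return: True if the first list is a continuation of the second list, False otherwise.
--     :rtype: bool
--     """
--     if first == second:
--         return True
--
--     # Check if first has at least one item not in second
--     if not any(item not in second for item in first):
--         return False
--
--     # Find common items
--     common_items = [item for item in first if item in second]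
--
--     # Check if there is at least one common item
--     if not common_items:
--         return False
--
--     # Check if the order of common items is the same in both lists
--     second_indices = [second.index(item) for item in common_items]
--     if second_indices != sorted(second_indices):
--         return False
--
--     return True
-- ===== SOURCE B (Python) =====
-- from typing import Any, List
--
--
-- def first_continued_second(first: List[str], second: List[str]) -> bool:
--     if first == second:
--         return True
--     has_extra = False
--     found_common = False
--     prev = -1
--     for item in first:
--         if item in second:
--             idx = second.index(item)
--             if idx < prev:
--                 return False
--             found_common = True
--             prev = idx
--         else:
--             has_extra = True
--     return has_extra and found_common
-- ===== Notes on version B (the rewrite author's own statement) =====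
-- stated objective: alternative
-- what changed: A's four passes (extra-item scan, common-item filter, index-list build, sort-then-compare) are fused into a single left-to-right scan over first that keeps an extra/common flag and the last common item's index in second, returning False as soon as an index decreases.
import Mathlib
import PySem

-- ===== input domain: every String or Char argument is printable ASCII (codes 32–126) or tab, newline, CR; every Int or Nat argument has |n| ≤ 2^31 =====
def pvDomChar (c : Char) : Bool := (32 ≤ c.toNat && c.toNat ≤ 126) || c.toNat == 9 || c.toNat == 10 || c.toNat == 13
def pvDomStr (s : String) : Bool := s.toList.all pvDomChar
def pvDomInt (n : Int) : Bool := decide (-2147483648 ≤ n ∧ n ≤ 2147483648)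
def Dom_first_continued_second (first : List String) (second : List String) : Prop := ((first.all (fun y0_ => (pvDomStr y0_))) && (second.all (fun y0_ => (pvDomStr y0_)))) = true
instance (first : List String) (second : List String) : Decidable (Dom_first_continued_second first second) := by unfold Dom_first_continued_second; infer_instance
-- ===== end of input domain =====

-- B fuses A's four passes (extra-item scan, common-item filter, index list, sort-and-compare)
-- into one left-to-right scan maintaining an extra/common flag and the last common index
-- (objective: alternative decomposition; same exact result).

-- ===== PORT A =====
-- second.index(item): only evaluated for items of common_items, which are all in second,
-- so index? is always `some` there and the `.getD 0` default never fires.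
def first_continued_second (first : List String) (second : List String) : Bool :=
  if first = second then true
  else if !(first.any (fun item => !(second.contains item))) then false
  else
    let common_items := first.filter (fun item => second.contains item)
    if common_items = [] then false
    else
      let second_indices : List Int :=
        common_items.map (fun item => (((PySem.List.index? second item).getD 0 : Nat) : Int))
      if second_indices ≠ PySem.List.sorted second_indices (fun x => x) false then false
      else true

-- ===== PORT B =====
-- the fused scan: has_extra, found_common, prev (last common index, -1 initially);
-- early `return False` when an index decreases
def fcsLoop (second : List String) : List String → Bool → Bool → Int → Bool
  | [], has_extra, found_common, _ => has_extra && found_common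
  | item :: rest, has_extra, found_common, prev =>
    if second.contains item then
      let idx : Int := (((PySem.List.index? second item).getD 0 : Nat) : Int)
      if idx < prev then false
      else fcsLoop second rest has_extra true idx
    else fcsLoop second rest true found_common prev

def first_continued_second_alt (first : List String) (second : List String) : Bool :=
  if first = second then true
  else fcsLoop second first false false (-1)

-- ===== PRECONDITION & SPEC =====
def Spec_first_continued_second (first : List String) (second : List String) (out : Bool) : Prop := out = first_continued_second_alt first second
instance (first : List String) (second : List String) (out : Bool) : Decidable (Spec_first_continued_second first second out) := by unfold Spec_first_continued_second; infer_instance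

-- ===== CLAIM (what is proved, stated in full; the proofs are below) =====
def Claim_equal_first_continued_second : Prop := ∀ (first : List String) (second : List String), Dom_first_continued_second first second → Spec_first_continued_second first second (first_continued_second first second)

-- ===== LEMMAS AND PROOFS =====

-- the monotonicity check B's scan performs, on the index sequence alone
def fcsMono : Int → List Int → Bool
  | _, [] => true
  | p, i :: t => !(i < p) && fcsMono i t

-- the index sequence of the common items of l
def fcsInds (second : List String) (l : List String) : List Int :=
  (l.filter (fun item => second.contains item)).map
    (fun item => (((PySem.List.index? second item).getD 0 : Nat) : Int))

lemma fcsLoop_char (second : List String) (l : List String) :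
    ∀ (he fc : Bool) (prev : Int),
    fcsLoop second l he fc prev =
      (fcsMono prev (fcsInds second l)
        && (he || l.any (fun item => !(second.contains item)))
        && (fc || l.any (fun item => second.contains item))) := by
  induction l with
  | nil => intro he fc prev; simp [fcsLoop, fcsInds, fcsMono]
  | cons x t ih =>
    intro he fc prev
    by_cases hx : x ∈ second
    · by_cases hlt : (((List.idxOf? x second).getD 0 : Nat) : Int) < prev
      · simp [fcsLoop, fcsInds, fcsMono, hx, hlt]
      · simp [fcsLoop, fcsInds, fcsMono, hx, hlt, ih]
    · simp [fcsLoop, fcsInds, hx, ih]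

lemma fcsMono_le {p : Int} {l : List Int} (h : fcsMono p l = true) :
    ∀ j ∈ l, p ≤ j := by
  induction l generalizing p with
  | nil => simp
  | cons i t ih =>
    simp only [fcsMono, Bool.and_eq_true, Bool.not_eq_true', decide_eq_false_iff_not,
      Int.not_lt] at h
    intro j hj
    rcases List.mem_cons.mp hj with rfl | hj
    · omega
    · have := ih h.2 j hj; omega

lemma fcsMono_pairwise {p : Int} {l : List Int} (h : fcsMono p l = true) :
    l.Pairwise (· ≤ ·) := by
  induction l generalizing p with
  | nil => exact List.Pairwise.nil
  | cons i t ih =>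
    simp only [fcsMono, Bool.and_eq_true] at h
    exact List.Pairwise.cons (fcsMono_le h.2) (ih h.2)

lemma fcsMono_of_pairwise {l : List Int} (hl : l.Pairwise (· ≤ ·)) :
    ∀ p : Int, (∀ j ∈ l, p ≤ j) → fcsMono p l = true := by
  induction l with
  | nil => intro p _; rfl
  | cons i t ih =>
    intro p hp
    have hpi : p ≤ i := hp i (List.mem_cons_self ..)
    simp only [fcsMono, Bool.and_eq_true, Bool.not_eq_true', decide_eq_false_iff_not,
      Int.not_lt]
    exact ⟨hpi, ih (List.Pairwise.sublist (List.sublist_cons_self i t) hl)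
      i (fun j hj => List.rel_of_pairwise_cons hl hj)⟩

lemma fcsInds_nonneg (second : List String) (l : List String) :
    ∀ j ∈ fcsInds second l, (0 : Int) ≤ j := by
  intro j hj
  rcases List.mem_map.mp hj with ⟨item, _, rfl⟩
  exact Int.natCast_nonneg _

-- A's sort-and-compare test equals B's monotone-scan test on the common index sequence
lemma sorted_test_eq_mono (second : List String) (l : List String) :
    (fcsInds second l = PySem.List.sorted (fcsInds second l) (fun x => x) false)
      ↔ fcsMono (-1) (fcsInds second l) = true := by
  constructor
  · intro h
    have hpw : (fcsInds second l).Pairwise (· ≤ ·) := by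
      have := PySem.List.sorted_pairwise (xs := fcsInds second l) (key := fun x => x)
      rw [← h] at this
      exact this
    exact fcsMono_of_pairwise hpw (-1)
      (fun j hj => le_trans (by norm_num) (fcsInds_nonneg second l j hj))
  · intro h
    exact (PySem.List.sorted_eq_self_of_pairwise (fcsInds second l) (fun x => x) (fcsMono_pairwise h)).symm

lemma filter_eq_nil_iff_not_any (second : List String) (l : List String) :
    (l.filter (fun item => second.contains item) = []) ↔
      (l.any (fun item => second.contains item)) = false := by
  simp [List.filter_eq_nil_iff]

lemma fcsCombine (e a m : Bool) (c s : Prop) [Decidable c] [Decidable s]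
    (hc : c ↔ a = false) (hs : s ↔ m = true) :
    (if !e then false else if c then false else if ¬ s then false else true)
      = (m && (false || e) && (false || a)) := by
  cases e <;> cases a <;> cases m <;>
    split_ifs with h1 h2 h3 <;> simp_all

-- ===== VERDICT (by name: the statement is the Claim_ definition above) =====
theorem first_continued_second_spec : Claim_equal_first_continued_second := by
  intro first second _
  unfold Spec_first_continued_second first_continued_second first_continued_second_alt
  by_cases heq : first = second
  · simp [heq]
  · rw [if_neg heq, if_neg heq, fcsLoop_char]
    exact fcsCombine (first.any fun item => !(second.contains item))
      (first.any fun item => second.contains item)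
      (fcsMono (-1) (fcsInds second first))
      (first.filter (fun item => second.contains item) = [])
      (fcsInds second first =
        PySem.List.sorted (fcsInds second first) (fun x => x) false)
      (filter_eq_nil_iff_not_any second first)
      (sorted_test_eq_mono second first)
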